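-- pv_equiv track=rewrite | github.com/matthewdholtkamp/testfile | scripts/build_atlas_quality_gate.py | readiness_score
-- ===== SOURCE A (Python) =====
-- def normalize(value):
--     return ' '.join((value or '').split()).strip()
--
-- def count_rows(rows, key, value):
--     return sum(1 for row in rows if normalize(row.get(key)) == value)
--
-- def readiness_score(mechanism, ledger_rows, synthesis_rows):
--     stable = count_rows(ledger_rows, 'confidence_bucket', 'stable')
--     provisional = count_rows(ledger_rows, 'confidence_bucket', 'provisional')
--     blocked = sum(1 for row in ledger_rows if normalize(row.get('promotion_note')) != 'ready to write')
--     bridge_rows = count_rows(synthesis_rows, 'synthesis_role', 'bridge')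
--     translational_rows = count_rows(synthesis_rows, 'synthesis_role', 'translational_hook')
--     promotion_status = normalize(mechanism.get('promotion_status'))
--     base = stable * 24
--     base += bridge_rows * 8
--     base += translational_rows * 3
--     base += int(mechanism.get('target_rows') or 0) * 1
--     base += int(mechanism.get('trial_rows') or 0) * 2
--     base += int(mechanism.get('genomics_rows') or 0) * 5
--     if promotion_status == 'near_ready':
--         base += 8
--     elif promotion_status == 'hold':
--         base -= 8
--     base -= provisional * 5
--     base -= blocked * 12
--     base -= int(mechanism.get('queue_burden') or 0) * 3
--     return max(0, min(100, base))
-- ===== SOURCE B (Python) =====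
-- def normalize(value):
--     return ' '.join((value or '').split()).strip()
--
--
-- def readiness_score(mechanism, ledger_rows, synthesis_rows):
--     stable = provisional = blocked = 0
--     for row in ledger_rows:
--         bucket = normalize(row.get('confidence_bucket'))
--         if normalize(row.get('promotion_note')) != 'ready to write':
--             blocked += 1
--         if bucket == 'stable':
--             stable += 1
--         elif bucket == 'provisional':
--             provisional += 1
--     bridge_rows = translational_rows = 0
--     for row in synthesis_rows:
--         role = normalize(row.get('synthesis_role'))
--         if role == 'bridge':
--             bridge_rows += 1
--         elif role == 'translational_hook':
--             translational_rows += 1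
--     status = normalize(mechanism.get('promotion_status'))
--     base = (stable * 24 + bridge_rows * 8 + translational_rows * 3
--             + int(mechanism.get('target_rows') or 0)
--             + int(mechanism.get('trial_rows') or 0) * 2
--             + int(mechanism.get('genomics_rows') or 0) * 5)
--     if status == 'near_ready':
--         base += 8
--     elif status == 'hold':
--         base -= 8
--     base -= provisional * 5 + blocked * 12 + int(mechanism.get('queue_burden') or 0) * 3
--     return max(0, min(100, base))
-- ===== Notes on version B (the rewrite author's own statement) =====
-- stated objective: alternative
-- what changed: Replaced the five separate counting scans (three over ledger_rows, two over synthesis_rows) with a single fused accumulation pass per list that normalizes each row's field once and updates all counters together.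
-- outside the precondition, e.g. on readiness_score({'target_rows': '0x10'}, [], []): A raises ValueError, B raises ValueError
import Mathlib
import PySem

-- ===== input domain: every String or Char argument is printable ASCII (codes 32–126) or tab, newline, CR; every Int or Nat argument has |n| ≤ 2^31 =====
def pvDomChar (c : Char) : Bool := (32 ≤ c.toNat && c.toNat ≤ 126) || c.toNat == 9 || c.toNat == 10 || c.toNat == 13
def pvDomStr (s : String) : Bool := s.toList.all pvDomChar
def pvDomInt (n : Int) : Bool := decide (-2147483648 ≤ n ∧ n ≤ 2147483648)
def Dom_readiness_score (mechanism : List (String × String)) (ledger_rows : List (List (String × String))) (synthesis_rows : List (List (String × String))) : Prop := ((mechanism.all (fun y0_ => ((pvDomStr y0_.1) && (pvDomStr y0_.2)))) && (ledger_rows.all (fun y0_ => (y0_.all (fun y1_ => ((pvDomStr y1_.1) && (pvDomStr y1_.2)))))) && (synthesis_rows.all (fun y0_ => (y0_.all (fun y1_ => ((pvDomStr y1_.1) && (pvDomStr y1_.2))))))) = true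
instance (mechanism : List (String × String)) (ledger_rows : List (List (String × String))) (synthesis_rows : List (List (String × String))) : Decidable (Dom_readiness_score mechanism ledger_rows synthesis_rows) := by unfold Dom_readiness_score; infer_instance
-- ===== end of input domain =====

-- B fuses A's five separate counting scans into one accumulation pass per row list (same arithmetic, same clamp).

-- ===== PORT A =====
-- row.get(key): first-match lookup in the association list (dict convention)
def rsGet (row : List (String × String)) (key : String) : Option String :=
  (row.find? (fun p => p.1 == key)).map (·.2)

-- normalize(value) = ' '.join((value or '').split()).strip()
def rsNorm (v : Option String) : String :=
  PySem.Str.strip (PySem.Str.join " " (PySem.Str.split₀ (v.getD "")))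

-- int(mechanism.get(k) or 0); total form: .getD 0 where Python raises ValueError (excluded by Pre_)
def rsIntOr0 (v : Option String) : Int :=
  match v with
  | none => 0
  | some s => if s = "" then 0 else (PySem.Int.ofStr? s).getD 0

def count_rows (rows : List (List (String × String))) (key value : String) : Int :=
  rows.foldl (fun acc row => if rsNorm (rsGet row key) = value then acc + 1 else acc) 0

def readiness_score (mechanism : List (String × String)) (ledger_rows : List (List (String × String))) (synthesis_rows : List (List (String × String))) : Int :=
  let stable := count_rows ledger_rows "confidence_bucket" "stable"
  let provisional := count_rows ledger_rows "confidence_bucket" "provisional"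
  let blocked := ledger_rows.foldl (fun acc row => if rsNorm (rsGet row "promotion_note") ≠ "ready to write" then acc + 1 else acc) (0 : Int)
  let bridge_rows := count_rows synthesis_rows "synthesis_role" "bridge"
  let translational_rows := count_rows synthesis_rows "synthesis_role" "translational_hook"
  let promotion_status := rsNorm (rsGet mechanism "promotion_status")
  let base := stable * 24
  let base := base + bridge_rows * 8
  let base := base + translational_rows * 3
  let base := base + rsIntOr0 (rsGet mechanism "target_rows") * 1
  let base := base + rsIntOr0 (rsGet mechanism "trial_rows") * 2
  let base := base + rsIntOr0 (rsGet mechanism "genomics_rows") * 5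
  let base := if promotion_status = "near_ready" then base + 8
              else if promotion_status = "hold" then base - 8 else base
  let base := base - provisional * 5
  let base := base - blocked * 12
  let base := base - rsIntOr0 (rsGet mechanism "queue_burden") * 3
  max 0 (min 100 base)

-- ===== PORT B =====
def readiness_score_alt (mechanism : List (String × String)) (ledger_rows : List (List (String × String))) (synthesis_rows : List (List (String × String))) : Int :=
  let lc := ledger_rows.foldl (fun acc row =>
      let bucket := rsNorm (rsGet row "confidence_bucket")
      let blocked := if rsNorm (rsGet row "promotion_note") ≠ "ready to write" then acc.2.2 + 1 else acc.2.2
      if bucket = "stable" then (acc.1 + 1, acc.2.1, blocked)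
      else if bucket = "provisional" then (acc.1, acc.2.1 + 1, blocked)
      else (acc.1, acc.2.1, blocked)) ((0, 0, 0) : Int × Int × Int)
  let sc := synthesis_rows.foldl (fun acc row =>
      let role := rsNorm (rsGet row "synthesis_role")
      if role = "bridge" then (acc.1 + 1, acc.2)
      else if role = "translational_hook" then (acc.1, acc.2 + 1)
      else acc) ((0, 0) : Int × Int)
  let status := rsNorm (rsGet mechanism "promotion_status")
  let base := lc.1 * 24 + sc.1 * 8 + sc.2 * 3
      + rsIntOr0 (rsGet mechanism "target_rows")
      + rsIntOr0 (rsGet mechanism "trial_rows") * 2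
      + rsIntOr0 (rsGet mechanism "genomics_rows") * 5
  let base := if status = "near_ready" then base + 8
              else if status = "hold" then base - 8 else base
  let base := base - (lc.2.1 * 5 + lc.2.2 * 12 + rsIntOr0 (rsGet mechanism "queue_burden") * 3)
  max 0 (min 100 base)

-- ===== PRECONDITION & SPEC =====
-- whether int(mechanism.get(k) or 0) returns in Python: key absent, value falsy, or int-parsable
def rsIntOk (mechanism : List (String × String)) (key : String) : Bool :=
  match rsGet mechanism key with
  | none => true
  | some s => s == "" || (PySem.Int.ofStr? s).isSome

-- Pre_ excludes exactly the inputs where A's int() raises ValueError (non-empty, non-int-parsable mechanism values)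
def Pre_readiness_score (mechanism : List (String × String)) (ledger_rows : List (List (String × String))) (synthesis_rows : List (List (String × String))) : Prop :=
  (rsIntOk mechanism "target_rows" && rsIntOk mechanism "trial_rows" &&
   rsIntOk mechanism "genomics_rows" && rsIntOk mechanism "queue_burden") = true
instance (mechanism : List (String × String)) (ledger_rows : List (List (String × String))) (synthesis_rows : List (List (String × String))) : Decidable (Pre_readiness_score mechanism ledger_rows synthesis_rows) := by unfold Pre_readiness_score; infer_instance

def pvWitness_readiness_score : (List (String × String)) × (List (List (String × String))) × (List (List (String × String))) :=
  ([("promotion_status", "near_ready"), ("target_rows", " 7 ")],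
   [[("confidence_bucket", "stable"), ("promotion_note", "ready  to write")], [("confidence_bucket", "provisional")]],
   [[("synthesis_role", "bridge")]])

def Spec_readiness_score (mechanism : List (String × String)) (ledger_rows : List (List (String × String))) (synthesis_rows : List (List (String × String))) (out : Int) : Prop := out = readiness_score_alt mechanism ledger_rows synthesis_rows
instance (mechanism : List (String × String)) (ledger_rows : List (List (String × String))) (synthesis_rows : List (List (String × String))) (out : Int) : Decidable (Spec_readiness_score mechanism ledger_rows synthesis_rows out) := by unfold Spec_readiness_score; infer_instance

-- ===== CLAIM (what is proved, stated in full; the proofs are below) =====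
def Claim_equal_readiness_score : Prop := ∀ (mechanism : List (String × String)) (ledger_rows : List (List (String × String))) (synthesis_rows : List (List (String × String))), Dom_readiness_score mechanism ledger_rows synthesis_rows → Pre_readiness_score mechanism ledger_rows synthesis_rows → Spec_readiness_score mechanism ledger_rows synthesis_rows (readiness_score mechanism ledger_rows synthesis_rows)

-- ===== LEMMAS AND PROOFS =====

-- B's fused ledger pass computes A's three separate ledger counts
theorem rs_ledger_fold (l : List (List (String × String))) (s p b : Int) :
    l.foldl (fun acc row =>
      let bucket := rsNorm (rsGet row "confidence_bucket")
      let blocked := if rsNorm (rsGet row "promotion_note") ≠ "ready to write" then acc.2.2 + 1 else acc.2.2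
      if bucket = "stable" then (acc.1 + 1, acc.2.1, blocked)
      else if bucket = "provisional" then (acc.1, acc.2.1 + 1, blocked)
      else (acc.1, acc.2.1, blocked)) (s, p, b)
    = (l.foldl (fun acc row => if rsNorm (rsGet row "confidence_bucket") = "stable" then acc + 1 else acc) s,
       l.foldl (fun acc row => if rsNorm (rsGet row "confidence_bucket") = "provisional" then acc + 1 else acc) p,
       l.foldl (fun acc row => if rsNorm (rsGet row "promotion_note") ≠ "ready to write" then acc + 1 else acc) b) := by
  induction l generalizing s p b with
  | nil => rfl
  | cons row rest ih =>
    simp only [List.foldl_cons]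
    by_cases h1 : rsNorm (rsGet row "confidence_bucket") = "stable" <;>
      by_cases h2 : rsNorm (rsGet row "confidence_bucket") = "provisional" <;>
        simp_all

-- B's fused synthesis pass computes A's two separate synthesis counts
theorem rs_synth_fold (l : List (List (String × String))) (x y : Int) :
    l.foldl (fun acc row =>
      let role := rsNorm (rsGet row "synthesis_role")
      if role = "bridge" then (acc.1 + 1, acc.2)
      else if role = "translational_hook" then (acc.1, acc.2 + 1)
      else acc) (x, y)
    = (l.foldl (fun acc row => if rsNorm (rsGet row "synthesis_role") = "bridge" then acc + 1 else acc) x,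
       l.foldl (fun acc row => if rsNorm (rsGet row "synthesis_role") = "translational_hook" then acc + 1 else acc) y) := by
  induction l generalizing x y with
  | nil => rfl
  | cons row rest ih =>
    simp only [List.foldl_cons]
    by_cases h1 : rsNorm (rsGet row "synthesis_role") = "bridge" <;>
      by_cases h2 : rsNorm (rsGet row "synthesis_role") = "translational_hook" <;>
        simp_all

-- ===== VERDICT (by name: the statement is the Claim_ definition above) =====
theorem readiness_score_spec : Claim_equal_readiness_score := by
  intro mechanism ledger_rows synthesis_rows _ _
  unfold Spec_readiness_score readiness_score readiness_score_alt count_rows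
  rw [rs_ledger_fold, rs_synth_fold]
  dsimp only
  split_ifs <;> omega
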